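-- pv_equiv track=rewrite | github.com/HaymayndzUltra/Matalinongworkflow | KYC_VERIFICATION/scripts/generate_datasets_pure.py | screenshot_tamper
-- ===== SOURCE A (Python) =====
-- def screenshot_tamper(img):
--     # Light grid overlay
--     H, W = len(img), len(img[0])
--     for x in range(0, W, 12):
--         for y in range(H):
--             r, g, b = img[y][x]
--             img[y][x] = (min(255, r + 20), min(255, g + 20), min(255, b + 20))
--     for y in range(0, H, 12):
--         for x in range(W):
--             r, g, b = img[y][x]
--             img[y][x] = (min(255, r + 20), min(255, g + 20), min(255, b + 20))
--     return img
-- ===== SOURCE B (Python) =====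
-- def screenshot_tamper(img):
--     # Single dense pass: for each pixel position, count the grid lines through it
--     # (c in {0,1,2}) and apply one capped addition of 20*c.
--     W = len(img[0])
--     for y, row in enumerate(img):
--         for x in range(W):
--             c = (x % 12 == 0) + (y % 12 == 0)
--             if c:
--                 r, g, b = row[x]
--                 row[x] = (min(255, r + 20 * c), min(255, g + 20 * c), min(255, b + 20 * c))
--     return img
-- ===== Notes on version B (the rewrite author's own statement) =====
-- stated objective: alternative
-- what changed: A overlays the grid with two sparse passes (one over grid columns, one over grid rows, each adding +20 capped, so intersections get two capped additions); B does a single dense pass over every pixel, counts the grid lines through it (c in {0,1,2}) and applies one capped addition of 20*c.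
import Mathlib
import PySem

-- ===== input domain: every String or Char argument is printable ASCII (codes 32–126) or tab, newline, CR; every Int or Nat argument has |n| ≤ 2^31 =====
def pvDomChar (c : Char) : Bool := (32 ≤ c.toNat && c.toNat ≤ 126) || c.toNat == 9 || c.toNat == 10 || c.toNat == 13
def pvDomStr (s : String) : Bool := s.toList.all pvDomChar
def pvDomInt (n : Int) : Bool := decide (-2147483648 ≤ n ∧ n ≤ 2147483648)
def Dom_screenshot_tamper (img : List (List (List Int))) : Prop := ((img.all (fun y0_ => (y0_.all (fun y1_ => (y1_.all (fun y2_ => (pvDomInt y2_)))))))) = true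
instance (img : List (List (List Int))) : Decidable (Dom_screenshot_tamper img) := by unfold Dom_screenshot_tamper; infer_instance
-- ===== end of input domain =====

-- Both Pythons mutate img in place and return it; the equivalence proved here is about the
-- return value (B performs the same final writes, only merged into one pass).
-- B: one dense pass per pixel with a grid-line count, instead of A's two sparse passes.

-- ===== PORT A =====
-- `r, g, b = px` then channelwise min(255, ch+20); on a pixel that is not a 3-list Python
-- raises ValueError (outside Pre_), the port returns the pixel unchanged there.
def pvBump (px : List Int) : List Int :=
  match px with
  | [r, g, b] => [min 255 (r + 20), min 255 (g + 20), min 255 (b + 20)]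
  | _ => px

def screenshot_tamper (img : List (List (List Int))) : List (List (List Int)) :=
  let H := img.length
  let W := (img.headD []).length
  let img1 := (PySem.List.pyRange 0 (W : Int) 12).foldl
    (fun im x => (List.range H).foldl
      (fun im y => im.set y ((im.getD y []).set x.toNat (pvBump ((im.getD y []).getD x.toNat [])))) im) img
  (PySem.List.pyRange 0 (H : Int) 12).foldl
    (fun im y => (List.range W).foldl
      (fun im x => im.set y.toNat ((im.getD y.toNat []).set x (pvBump ((im.getD y.toNat []).getD x [])))) im) img1

-- ===== PORT B =====
-- `r, g, b = row[x]` then channelwise min(255, ch+20*c); on a pixel that is not a 3-list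
-- Python raises ValueError (outside Pre_), the port returns the pixel unchanged there.
def pvBumpN (c : Int) (px : List Int) : List Int :=
  match px with
  | [r, g, b] => [min 255 (r + 20 * c), min 255 (g + 20 * c), min 255 (b + 20 * c)]
  | _ => px

def screenshot_tamper_alt (img : List (List (List Int))) : List (List (List Int)) :=
  let W := (img.headD []).length
  img.mapIdx (fun y row => (List.range W).foldl (fun row x =>
    let c : Int := (if x % 12 = 0 then 1 else 0) + (if y % 12 = 0 then 1 else 0)
    if c ≠ 0 then row.set x (pvBumpN c (row.getD x [])) else row) row)

-- ===== PRECONDITION & SPEC =====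
-- Pre_ is exactly where Python A returns: the image is non-empty, every grid column x (x%12=0,
-- x < W = len(img[0])) exists in every row and holds a 3-channel pixel, and every grid row
-- (y%12=0) has at least W pixels, all 3-channel.  Outside this A raises (IndexError/ValueError).
def Pre_screenshot_tamper (img : List (List (List Int))) : Prop :=
  img ≠ [] ∧
  ∀ i ∈ List.range img.length,
    (∀ x ∈ List.range (img.headD []).length, x % 12 = 0 →
        x < (img.getD i []).length ∧ ((img.getD i []).getD x []).length = 3) ∧
    (i % 12 = 0 → (img.headD []).length ≤ (img.getD i []).length ∧
        ∀ x ∈ List.range (img.headD []).length, ((img.getD i []).getD x []).length = 3)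
instance (img : List (List (List Int))) : Decidable (Pre_screenshot_tamper img) := by
  unfold Pre_screenshot_tamper; infer_instance

def pvWitness_screenshot_tamper : List (List (List Int)) := [[[1, 2, 3]], [[250, 0, 40]]]

def Spec_screenshot_tamper (img : List (List (List Int))) (out : List (List (List Int))) : Prop :=
  out = screenshot_tamper_alt img
instance (img : List (List (List Int))) (out : List (List (List Int))) :
    Decidable (Spec_screenshot_tamper img out) := by unfold Spec_screenshot_tamper; infer_instance

-- ===== CLAIM (what is proved, stated in full; the proofs are below) =====
def Claim_equal_screenshot_tamper : Prop := ∀ (img : List (List (List Int))),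
  Dom_screenshot_tamper img → Pre_screenshot_tamper img →
  Spec_screenshot_tamper img (screenshot_tamper img)

-- ===== LEMMAS AND PROOFS =====

-- a single in-place update written as a mapIdx
theorem pv_upd_eq_mapIdx {α : Type} (l : List α) (i : Nat) (g : α → α) (d : α) :
    l.set i (g (l.getD i d)) = l.mapIdx (fun j a => if j = i then g a else a) := by
  apply List.ext_getElem
  · simp
  · intro j h1 h2
    simp only [List.getElem_set, List.getElem_mapIdx]
    by_cases hij : i = j
    · subst hij
      have hlen : i < l.length := by simpa using h2
      simp [List.getD, List.getElem?_eq_getElem hlen]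
    · simp [hij, Ne.symm hij]

theorem pv_mapIdx_id {α : Type} (l : List α) : l.mapIdx (fun _ a => a) = l := by
  apply List.ext_getElem
  · simp
  · intro i h1 h2
    simp

-- a fold of in-place updates over distinct indices is a mapIdx
theorem pv_foldl_upd_eq_mapIdx {α : Type} (g : Nat → α → α) (d : α) :
    ∀ (xs : List Nat), xs.Nodup → ∀ (l : List α),
    xs.foldl (fun l i => l.set i (g i (l.getD i d))) l
      = l.mapIdx (fun i a => if i ∈ xs then g i a else a) := by
  intro xs
  induction xs with
  | nil => intro _ l; simpa using (pv_mapIdx_id l).symm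
  | cons y ys ih =>
    intro hnd l
    have hy : y ∉ ys := (List.nodup_cons.mp hnd).1
    simp only [List.foldl_cons]
    rw [pv_upd_eq_mapIdx l y (g y) d, ih (List.nodup_cons.mp hnd).2, List.mapIdx_mapIdx]
    congr 1
    funext i a
    simp only [Function.comp, List.mem_cons]
    by_cases h1 : i ∈ ys
    · have : i ≠ y := fun h => hy (h ▸ h1)
      simp [h1, this]
    · by_cases h2 : i = y
      · subst h2; simp [h1]
      · simp [h1, h2]

theorem pv_foldl_mapIdx {α β : Type} (F : Nat → β → α → α) :
    ∀ (xs : List β) (l : List α),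
    xs.foldl (fun l b => l.mapIdx (fun i a => F i b a)) l
      = l.mapIdx (fun i a => xs.foldl (fun a b => F i b a) a) := by
  intro xs
  induction xs with
  | nil => intro l; simp [pv_mapIdx_id]
  | cons b bs ih =>
    intro l
    simp only [List.foldl_cons]
    rw [ih, List.mapIdx_mapIdx]
    rfl

theorem pv_foldl_id {α β : Type} (xs : List β) (a : α) :
    xs.foldl (fun a _ => a) a = a := by
  induction xs with
  | nil => rfl
  | cons b bs ih => exact ih

theorem pv_foldl_if_const {α β : Type} (c : Prop) [Decidable c] (f : β → α → α)
    (xs : List β) (a : α) :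
    xs.foldl (fun a b => if c then f b a else a) a
      = if c then xs.foldl (fun a b => f b a) a else a := by
  by_cases hc : c
  · simp [hc]
  · simp only [if_neg hc]
    exact pv_foldl_id xs a

-- repeated writes to the same outer slot collapse to one write of a row-fold
theorem pv_foldl_set_fixed {α β : Type} (j : Nat) (d : α) (h : β → α → α) :
    ∀ (xs : List β) (l : List α),
    xs.foldl (fun l b => l.set j (h b (l.getD j d))) l
      = l.set j (xs.foldl (fun a b => h b a) (l.getD j d)) := by
  intro xs
  induction xs with
  | nil =>
    intro l
    apply List.ext_getElem
    · simp
    · intro i h1 h2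
      simp only [List.getElem_set]
      by_cases hij : j = i
      · subst hij
        have hlen : j < l.length := by simpa using h2
        simp [List.getD, List.getElem?_eq_getElem hlen]
      · simp [hij]
  | cons b bs ih =>
    intro l
    by_cases hj : j < l.length
    · simp only [List.foldl_cons]
      rw [ih, List.set_set]
      have : (l.set j (h b (l.getD j d))).getD j d = h b (l.getD j d) := by
        rw [List.getD_eq_getElem _ d (by simpa using hj)]
        simp
      rw [this]
    · have hset : ∀ (v : α), l.set j v = l := fun v => List.set_eq_of_length_le (by omega) ..
      simp only [List.foldl_cons, ih, hset]

-- membership and distinctness of the grid-column index list range(0, W, 12) (as Nats)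
theorem pv_grid_mem (W n : Nat) :
    n ∈ (PySem.List.pyRange 0 (W : Int) 12).map Int.toNat ↔ (n < W ∧ n % 12 = 0) := by
  simp only [List.mem_map]
  constructor
  · rintro ⟨x, hx, rfl⟩
    rw [PySem.List.mem_pyRange_iff_of_pos (by norm_num)] at hx
    obtain ⟨h0, h1, h2⟩ := hx
    rw [Int.sub_zero, Int.dvd_iff_emod_eq_zero] at h2
    omega
  · rintro ⟨h1, h2⟩
    refine ⟨(n : Int), ?_, Int.toNat_natCast n⟩
    rw [PySem.List.mem_pyRange_iff_of_pos (by norm_num), Int.sub_zero, Int.dvd_iff_emod_eq_zero]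
    omega

theorem pv_grid_nodup (W : Nat) :
    ((PySem.List.pyRange 0 (W : Int) 12).map Int.toNat).Nodup := by
  rw [PySem.List.pyRange_of_pos _ _ (by norm_num : (0:Int) < 12), List.map_map]
  apply List.Nodup.map _ (List.nodup_range)
  intro a b hab
  simp only [Function.comp] at hab
  omega

-- the column pass (A's first loop), characterised pointwise
theorem pv_pass1 (img : List (List (List Int))) (H W : Nat) (hH : H = img.length) :
    (PySem.List.pyRange 0 (W : Int) 12).foldl
      (fun im x => (List.range H).foldl
        (fun im y => im.set y ((im.getD y []).set x.toNat (pvBump ((im.getD y []).getD x.toNat [])))) im) img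
    = img.mapIdx (fun _ row =>
        row.mapIdx (fun x px => if x < W ∧ x % 12 = 0 then pvBump px else px)) := by
  have step : ∀ (im : List (List (List Int))) (x : Int),
      (List.range H).foldl
        (fun im y => im.set y ((im.getD y []).set x.toNat (pvBump ((im.getD y []).getD x.toNat [])))) im
      = im.mapIdx (fun y row => if y ∈ List.range H then
          row.set x.toNat (pvBump (row.getD x.toNat [])) else row) := by
    intro im x
    exact pv_foldl_upd_eq_mapIdx
      (fun _ row => row.set x.toNat (pvBump (row.getD x.toNat []))) [] _ (List.nodup_range) im
  calc
    (PySem.List.pyRange 0 (W : Int) 12).foldl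
      (fun im x => (List.range H).foldl
        (fun im y => im.set y ((im.getD y []).set x.toNat (pvBump ((im.getD y []).getD x.toNat [])))) im) img
      = (PySem.List.pyRange 0 (W : Int) 12).foldl
        (fun im x => im.mapIdx (fun y row => if y ∈ List.range H then
            row.set x.toNat (pvBump (row.getD x.toNat [])) else row)) img := by
          congr 1; funext im x; exact step im x
    _ = img.mapIdx (fun y row => (PySem.List.pyRange 0 (W : Int) 12).foldl
          (fun row x => if y ∈ List.range H then
            row.set x.toNat (pvBump (row.getD x.toNat [])) else row) row) := by
          exact pv_foldl_mapIdx _ _ _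
    _ = img.mapIdx (fun y row => if y ∈ List.range H then
          (PySem.List.pyRange 0 (W : Int) 12).foldl
            (fun row x => row.set x.toNat (pvBump (row.getD x.toNat []))) row else row) := by
          congr 1; funext y row
          exact pv_foldl_if_const _ _ _ _
    _ = img.mapIdx (fun _ row =>
          row.mapIdx (fun x px => if x < W ∧ x % 12 = 0 then pvBump px else px)) := by
          apply List.ext_getElem
          · simp
          · intro y h1 h2
            simp only [List.getElem_mapIdx]
            have hylt : y < img.length := by simpa using h1
            have hy : y ∈ List.range H := by rw [List.mem_range, hH]; exact hylt
            rw [if_pos hy]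
            have hmap := (List.foldl_map (f := Int.toNat)
              (g := fun (r : List (List Int)) n => r.set n (pvBump (r.getD n [])))
              (l := PySem.List.pyRange 0 (W : Int) 12) (init := img[y]'hylt)).symm
            rw [hmap, pv_foldl_upd_eq_mapIdx (fun _ => pvBump) [] _ (pv_grid_nodup W)]
            congr 1
            funext x px
            simp only [pv_grid_mem]

-- the row pass (A's second loop), characterised pointwise
theorem pv_pass2 (im : List (List (List Int))) (H W : Nat) :
    (PySem.List.pyRange 0 (H : Int) 12).foldl
      (fun im y => (List.range W).foldl
        (fun im x => im.set y.toNat ((im.getD y.toNat []).set x (pvBump ((im.getD y.toNat []).getD x [])))) im) im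
    = im.mapIdx (fun y row => if y < H ∧ y % 12 = 0 then
        row.mapIdx (fun x px => if x < W then pvBump px else px) else row) := by
  have hrow : ∀ (row : List (List Int)),
      (List.range W).foldl (fun r x => r.set x (pvBump (r.getD x []))) row
      = row.mapIdx (fun x px => if x < W then pvBump px else px) := by
    intro row
    rw [pv_foldl_upd_eq_mapIdx (fun _ => pvBump) [] _ (List.nodup_range) row]
    congr 1; funext x px; simp only [List.mem_range]
  have step : ∀ (im : List (List (List Int))) (y : Int),
      (List.range W).foldl
        (fun im x => im.set y.toNat ((im.getD y.toNat []).set x (pvBump ((im.getD y.toNat []).getD x [])))) im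
      = im.set y.toNat ((im.getD y.toNat []).mapIdx (fun x px => if x < W then pvBump px else px)) := by
    intro im y
    rw [pv_foldl_set_fixed y.toNat [] (fun x r => r.set x (pvBump (r.getD x [])))]
    rw [hrow]
  calc
    (PySem.List.pyRange 0 (H : Int) 12).foldl
      (fun im y => (List.range W).foldl
        (fun im x => im.set y.toNat ((im.getD y.toNat []).set x (pvBump ((im.getD y.toNat []).getD x [])))) im) im
      = (PySem.List.pyRange 0 (H : Int) 12).foldl
        (fun im y => im.set y.toNat
          ((im.getD y.toNat []).mapIdx (fun x px => if x < W then pvBump px else px))) im := by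
          congr 1; funext im y; exact step im y
    _ = ((PySem.List.pyRange 0 (H : Int) 12).map Int.toNat).foldl
        (fun im y => im.set y
          ((im.getD y []).mapIdx (fun x px => if x < W then pvBump px else px))) im := by
          exact (List.foldl_map (f := Int.toNat)
            (g := fun (im : List (List (List Int))) n => im.set n
              ((im.getD n []).mapIdx (fun x px => if x < W then pvBump px else px)))
            (l := PySem.List.pyRange 0 (H : Int) 12) (init := im)).symm
    _ = im.mapIdx (fun y row => if y ∈ (PySem.List.pyRange 0 (H : Int) 12).map Int.toNat then
          row.mapIdx (fun x px => if x < W then pvBump px else px) else row) := by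
          exact pv_foldl_upd_eq_mapIdx
            (fun _ row => row.mapIdx (fun x px => if x < W then pvBump px else px)) [] _
            (pv_grid_nodup H) im
    _ = im.mapIdx (fun y row => if y < H ∧ y % 12 = 0 then
          row.mapIdx (fun x px => if x < W then pvBump px else px) else row) := by
          congr 1; funext y row; simp only [pv_grid_mem]

theorem pv_set_getD_self {α : Type} (l : List α) (i : Nat) (d : α) :
    l.set i (l.getD i d) = l := by
  apply List.ext_getElem
  · simp
  · intro j h1 h2
    simp only [List.getElem_set]
    by_cases hij : i = j
    · subst hij
      simp [List.getD, List.getElem?_eq_getElem h2]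
    · simp [hij]

-- two capped +20 bumps equal one capped +20*2 bump (and one bump is the c = 1 case)
theorem pv_bumpN_two (px : List Int) : pvBumpN 2 px = pvBump (pvBump px) := by
  match px with
  | [a, b, c] =>
    refine List.cons_eq_cons.mpr ⟨by omega, List.cons_eq_cons.mpr ⟨by omega, List.cons_eq_cons.mpr ⟨by omega, rfl⟩⟩⟩
  | [] => rfl
  | [a] => rfl
  | [a, b] => rfl
  | a :: b :: c :: d :: tl => rfl

theorem pv_bumpN_one (px : List Int) : pvBumpN 1 px = pvBump px := by
  match px with
  | [a, b, c] => simp [pvBump, pvBumpN]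
  | [] => rfl
  | [a] => rfl
  | [a, b] => rfl
  | a :: b :: c :: d :: tl => rfl

-- B's dense pass, characterised pointwise
theorem pv_alt (img : List (List (List Int))) (W : Nat) (hW : W = (img.headD []).length) :
    screenshot_tamper_alt img
    = img.mapIdx (fun y row => row.mapIdx (fun x px =>
        if x < W then
          (if ((if x % 12 = 0 then (1:Int) else 0) + (if y % 12 = 0 then 1 else 0)) ≠ 0 then
            pvBumpN ((if x % 12 = 0 then 1 else 0) + (if y % 12 = 0 then 1 else 0)) px
          else px)
        else px)) := by
  subst hW
  simp only [screenshot_tamper_alt]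
  congr 1
  funext y row
  have hop : (fun (row : List (List Int)) (x : Nat) =>
      if ((if x % 12 = 0 then (1:Int) else 0) + (if y % 12 = 0 then 1 else 0)) ≠ 0 then
        row.set x (pvBumpN ((if x % 12 = 0 then 1 else 0) + (if y % 12 = 0 then 1 else 0)) (row.getD x []))
      else row)
    = fun (row : List (List Int)) (x : Nat) =>
      row.set x ((fun px => if ((if x % 12 = 0 then (1:Int) else 0) + (if y % 12 = 0 then 1 else 0)) ≠ 0 then
        pvBumpN ((if x % 12 = 0 then 1 else 0) + (if y % 12 = 0 then 1 else 0)) px else px) (row.getD x [])) := by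
    funext row x
    by_cases hc : ((if x % 12 = 0 then (1:Int) else 0) + (if y % 12 = 0 then 1 else 0)) ≠ 0
    · simp only [if_pos hc]
    · simp only [if_neg hc]
      exact (pv_set_getD_self row x []).symm
  rw [hop, pv_foldl_upd_eq_mapIdx (fun x px =>
    if ((if x % 12 = 0 then (1:Int) else 0) + (if y % 12 = 0 then 1 else 0)) ≠ 0 then
      pvBumpN ((if x % 12 = 0 then 1 else 0) + (if y % 12 = 0 then 1 else 0)) px
    else px) [] _ (List.nodup_range) row]
  congr 1
  funext x px
  simp only [List.mem_range]

-- ===== VERDICT (by name: the statement is the Claim_ definition above) =====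
theorem screenshot_tamper_spec : Claim_equal_screenshot_tamper := by
  intro img hdom hpre
  unfold Spec_screenshot_tamper
  rw [pv_alt img (img.headD []).length rfl]
  simp only [screenshot_tamper]
  rw [pv_pass1 img img.length (img.headD []).length rfl, pv_pass2, List.mapIdx_mapIdx]
  simp only [List.headD_eq_head?_getD]
  apply List.ext_getElem
  · simp
  · intro y hy1 hy2
    have hyH : y < img.length := by simpa using hy2
    simp only [List.getElem_mapIdx, Function.comp]
    by_cases hgy : y % 12 = 0
    · rw [if_pos ⟨hyH, hgy⟩]
      apply List.ext_getElem
      · simp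
      · intro x hx1 hx2
        simp only [List.getElem_mapIdx]
        by_cases hxW : x < (img.head?.getD []).length
        · by_cases hgx : x % 12 = 0
          · simp [hxW, hgx, hgy, pv_bumpN_two]
          · simp [hxW, hgx, hgy, pv_bumpN_one]
        · simp [hxW]
    · rw [if_neg (by simp [hgy])]
      apply List.ext_getElem
      · simp
      · intro x hx1 hx2
        simp only [List.getElem_mapIdx]
        by_cases hxW : x < (img.head?.getD []).length
        · by_cases hgx : x % 12 = 0
          · simp [hxW, hgx, hgy, pv_bumpN_one]
          · simp [hxW, hgx, hgy]
        · simp [hxW]
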